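-- pv_equiv track=rewrite | github.com/SeifBoukerdenna/gl | bot/architectures/delta_sniper.py | _get_delta_bucket
-- ===== SOURCE A (Python) =====
-- def _get_delta_bucket(delta_bps):
--     """Map a delta (in bps) to the bucket string used in the delta table."""
--     if delta_bps < -15:
--         return "<-15"
--     if delta_bps > 15:
--         return ">15"
--     # Buckets: [-15,-7), [-7,-5), [-5,-3), [-3,-1), [-1,1), [1,3), [3,5), [5,7), [7,15)
--     edges = [(-15, -7), (-7, -5), (-5, -3), (-3, -1), (-1, 1), (1, 3), (3, 5), (5, 7), (7, 15)]
--     for lo, hi in edges: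
--         if lo <= delta_bps < hi:
--             return "[{},{})".format(lo, hi)
--     return "[7,15)"
-- ===== SOURCE B (Python) =====
-- _BOUNDS = [-7, -5, -3, -1, 1, 3, 5, 7]
-- _LABELS = ["[-15,-7)", "[-7,-5)", "[-5,-3)", "[-3,-1)", "[-1,1)",
--            "[1,3)", "[3,5)", "[5,7)", "[7,15)"]
--
--
-- def _get_delta_bucket(delta_bps):
--     """Map a delta (in bps) to the bucket string used in the delta table."""
--     if delta_bps < -15:
--         return "<-15"
--     if delta_bps > 15:
--         return ">15"
--     # Binary search over the interior boundaries: index into precomputed labels.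
--     lo, hi = 0, len(_BOUNDS)
--     while lo < hi:
--         mid = (lo + hi) // 2
--         if delta_bps < _BOUNDS[mid]:
--             hi = mid
--         else:
--             lo = mid + 1
--     return _LABELS[lo]
-- ===== Notes on version B (the rewrite author's own statement) =====
-- stated objective: alternative
-- what changed: Replaces the linear scan over (lo,hi) edge pairs with runtime string formatting by a hand-written binary search over the eight interior boundaries indexing a precomputed label table.
import Mathlib
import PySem

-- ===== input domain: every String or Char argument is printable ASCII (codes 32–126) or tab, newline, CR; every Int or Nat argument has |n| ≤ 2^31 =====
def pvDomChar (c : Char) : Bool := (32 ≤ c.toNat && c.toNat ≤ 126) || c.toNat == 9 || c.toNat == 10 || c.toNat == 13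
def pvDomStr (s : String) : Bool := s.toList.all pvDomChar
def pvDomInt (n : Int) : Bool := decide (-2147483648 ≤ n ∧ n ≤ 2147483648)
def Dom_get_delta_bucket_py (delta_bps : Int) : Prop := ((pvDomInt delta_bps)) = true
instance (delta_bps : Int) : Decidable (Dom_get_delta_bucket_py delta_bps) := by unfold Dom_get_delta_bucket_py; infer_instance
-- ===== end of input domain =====

-- B replaces A's linear scan over edge pairs (with runtime string formatting) by a
-- binary search over the interior boundaries indexing a precomputed label table (alternative).

-- ===== PORT A =====
-- "[{},{})".format(lo, hi)
def pvFormatBucket (lo hi : Int) : String :=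
  String.mk (['['] ++ (PySem.Int.toStr lo).toList ++ [','] ++ (PySem.Int.toStr hi).toList ++ [')'])

-- the `for lo, hi in edges` loop with its early return
def pvLoopA (d : Int) : List (Int × Int) → String
  | [] => "[7,15)"
  | (lo, hi) :: rest =>
    if lo ≤ d ∧ d < hi then pvFormatBucket lo hi else pvLoopA d rest

def get_delta_bucket_py (delta_bps : Int) : String :=
  if delta_bps < -15 then "<-15"
  else if delta_bps > 15 then ">15"
  else
    pvLoopA delta_bps
      [(-15, -7), (-7, -5), (-5, -3), (-3, -1), (-1, 1), (1, 3), (3, 5), (5, 7), (7, 15)]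

-- ===== PORT B =====
def pvBounds : List Int := [-7, -5, -3, -1, 1, 3, 5, 7]

def pvLabels : List String :=
  ["[-15,-7)", "[-7,-5)", "[-5,-3)", "[-3,-1)", "[-1,1)", "[1,3)", "[3,5)", "[5,7)", "[7,15)"]

-- the hand-written `while lo < hi` binary-search loop of Source B
-- (fuel is a totalization guard only: the loop runs at most `a.length` times)
def pvBisect (x : Int) (a : List Int) : Nat → Nat → Nat → Nat
  | 0, lo, _ => lo
  | fuel + 1, lo, hi =>
    if lo < hi then
      let mid := (lo + hi) / 2
      match PySem.List.pyGet? a (mid : Int) with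
      | some v => if x < v then pvBisect x a fuel lo mid else pvBisect x a fuel (mid + 1) hi
      | none => lo  -- unreachable (mid is always in range)
    else lo

def get_delta_bucket_py_alt (delta_bps : Int) : String :=
  if delta_bps < -15 then "<-15"
  else if delta_bps > 15 then ">15"
  else
    match PySem.List.pyGet? pvLabels (pvBisect delta_bps pvBounds pvBounds.length 0 pvBounds.length : Int) with
    | some s => s
    | none => ""  -- unreachable totalization guard (the index is always 0..8)

-- ===== PRECONDITION & SPEC =====
def Spec_get_delta_bucket_py (delta_bps : Int) (out : String) : Prop := out = get_delta_bucket_py_alt delta_bps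
instance (delta_bps : Int) (out : String) : Decidable (Spec_get_delta_bucket_py delta_bps out) := by unfold Spec_get_delta_bucket_py; infer_instance

-- ===== CLAIM (what is proved, stated in full; the proofs are below) =====
def Claim_equal_get_delta_bucket_py : Prop := ∀ (delta_bps : Int), Dom_get_delta_bucket_py delta_bps → Spec_get_delta_bucket_py delta_bps (get_delta_bucket_py delta_bps)

-- ===== LEMMAS AND PROOFS =====

-- ===== VERDICT (by name: the statement is the Claim_ definition above) =====
theorem get_delta_bucket_py_spec : Claim_equal_get_delta_bucket_py := by
  intro d _
  unfold Spec_get_delta_bucket_py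
  by_cases h1 : d < -15
  · simp [get_delta_bucket_py, get_delta_bucket_py_alt, h1]
  · by_cases h2 : d > 15
    · simp [get_delta_bucket_py, get_delta_bucket_py_alt, h1, h2]
    · have hlo : -15 ≤ d := by omega
      have hhi : d ≤ 15 := by omega
      interval_cases d <;> decide
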